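-- pv_equiv track=rewrite | github.com/dubsidiya/checkbrain | desh/ege2026kp/25solve/25-299.py | matchMask
-- ===== SOURCE A (Python) =====
-- def matchMask( s ):
--   if not (s.startswith('78') and s.endswith('321') ):
--     return False
--   s = s[2:-3]
--   if '56' not in s: return False
--   pos = s.index('56')
--   return all( c in '13579' for c in s[pos+2:] ) and \
--          len(s[:pos]) == 1
-- ===== SOURCE B (Python) =====
-- def matchMask(s):
--     return (len(s) >= 8
--             and s[0:2] == '78'
--             and s[3:5] == '56'
--             and s[-3:] == '321'
--             and all(c in '13579' for c in s[5:-3]))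
-- ===== Notes on version B (the rewrite author's own statement) =====
-- stated objective: simpler
-- what changed: B drops A's index() search for the middle marker digits and the slicing relative to that search result: since A only ever accepts the marker at offset 1 of the middle, the marker position is fixed, so the whole check becomes a handful of fixed-position slice comparisons plus one odd-digit scan.
import Mathlib
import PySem

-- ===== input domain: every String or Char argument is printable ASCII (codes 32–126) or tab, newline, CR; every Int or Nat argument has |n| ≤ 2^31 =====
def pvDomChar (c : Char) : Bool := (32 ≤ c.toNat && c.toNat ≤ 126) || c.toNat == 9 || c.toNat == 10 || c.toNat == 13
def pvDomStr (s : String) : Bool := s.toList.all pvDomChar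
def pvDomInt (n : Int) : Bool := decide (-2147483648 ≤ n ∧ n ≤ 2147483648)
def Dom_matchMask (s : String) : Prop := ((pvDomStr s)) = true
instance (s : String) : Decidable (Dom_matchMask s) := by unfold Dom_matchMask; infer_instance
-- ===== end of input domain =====

-- B replaces A's index()-relative slicing by fixed-position slice comparisons (the searched-for marker is provably pinned to a fixed offset); objective: simpler.

-- ===== PORT A =====
def matchMask (s : String) : Bool :=
  if !(PySem.Str.startswith s "78" && PySem.Str.endswith s "321") then false
  else
    let t := PySem.Str.slice s (some 2) (some (-3))
    if !(PySem.Str.isIn "56" t) then false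
    else
      let pos := PySem.Str.find t "56"
      (PySem.Str.slice t (some (pos + 2)) none).toList.all
        (fun c => PySem.Chars.isIn [c] "13579".toList)
      && (PySem.Str.len (PySem.Str.slice t none (some pos)) == 1)

-- ===== PORT B =====
def matchMask_alt (s : String) : Bool :=
  decide (8 ≤ PySem.Str.len s)
  && (PySem.Str.slice s (some 0) (some 2) == "78")
  && (PySem.Str.slice s (some 3) (some 5) == "56")
  && (PySem.Str.slice s (some (-3)) none == "321")
  && (PySem.Str.slice s (some 5) (some (-3))).toList.all
      (fun c => PySem.Chars.isIn [c] "13579".toList)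

-- ===== PRECONDITION & SPEC =====
def Spec_matchMask (s : String) (out : Bool) : Prop := out = matchMask_alt s
instance (s : String) (out : Bool) : Decidable (Spec_matchMask s out) := by unfold Spec_matchMask; infer_instance

-- ===== CLAIM (what is proved, stated in full; the proofs are below) =====
def Claim_equal_matchMask : Prop := ∀ (s : String), Dom_matchMask s → Spec_matchMask s (matchMask s)

-- ===== LEMMAS AND PROOFS =====

/-- The common characterisation: '78', one arbitrary char, '56',
    a (possibly empty) run of odd digits, then '321'. -/
def PatP (L : List Char) : Prop :=
  ∃ x mid, L = '7' :: '8' :: x :: '5' :: '6' :: (mid ++ ['3', '2', '1']) ∧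
    ∀ c ∈ mid, c = '1' ∨ c = '3' ∨ c = '5' ∨ c = '7' ∨ c = '9'

theorem patP_length {L : List Char} (h : PatP L) : 8 ≤ L.length := by
  obtain ⟨x, mid, rfl, -⟩ := h
  simp

theorem conds_iff_patP (L : List Char) (h8 : 8 ≤ L.length) :
    (L.take 2 = ['7', '8'] ∧ (L.drop 3).take 2 = ['5', '6'] ∧
      L.drop (L.length - 3) = ['3', '2', '1'] ∧
      ∀ x ∈ (L.drop 5).take (L.length - 8),
        x = '1' ∨ x = '3' ∨ x = '5' ∨ x = '7' ∨ x = '9') ↔ PatP L := by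
  constructor
  · rintro ⟨h78, h56, h321, hodd⟩
    rcases L with _ | ⟨a, L⟩; · simp at h8
    rcases L with _ | ⟨b, L⟩; · simp at h8
    rcases L with _ | ⟨c, L⟩; · simp at h8
    rcases L with _ | ⟨d, L⟩; · simp at h8
    rcases L with _ | ⟨e, rest⟩; · simp at h8
    simp only [List.length_cons] at h8 h321 hodd
    have hr : 3 ≤ rest.length := by omega
    have e78 : List.take 2 (a :: b :: c :: d :: e :: rest) = [a, b] := rfl
    rw [e78] at h78
    have e56 : List.take 2 (List.drop 3 (a :: b :: c :: d :: e :: rest)) = [d, e] := rfl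
    rw [e56] at h56
    simp only [List.cons.injEq, and_true] at h78 h56
    obtain ⟨rfl, rfl⟩ := h78
    obtain ⟨rfl, rfl⟩ := h56
    have e1 : rest.length + 1 + 1 + 1 + 1 + 1 - 3 = (rest.length - 3) + 5 := by omega
    rw [e1, show (rest.length - 3) + 5 = 5 + (rest.length - 3) by omega,
        ← List.drop_drop] at h321
    have e2 : List.drop 5 ('7' :: '8' :: c :: '5' :: '6' :: rest) = rest := rfl
    rw [e2] at h321
    have e3 : rest.length + 1 + 1 + 1 + 1 + 1 - 8 = rest.length - 3 := by omega
    rw [e3] at hodd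
    have e4 : List.drop 5 ('7' :: '8' :: c :: '5' :: '6' :: rest) = rest := rfl
    rw [e4] at hodd
    refine ⟨c, rest.take (rest.length - 3), ?_, hodd⟩
    simp only [List.cons.injEq, true_and]
    conv_lhs => rw [← List.take_append_drop (rest.length - 3) rest]
    rw [h321]
  · rintro ⟨x, mid, rfl, hodd⟩
    have hlen : ('7' :: '8' :: x :: '5' :: '6' :: (mid ++ ['3', '2', '1'])).length
        = mid.length + 8 := by simp
    refine ⟨rfl, rfl, ?_, ?_⟩
    · rw [hlen, show mid.length + 8 - 3 = 5 + mid.length by omega, ← List.drop_drop]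
      have e2 : List.drop 5 ('7' :: '8' :: x :: '5' :: '6' :: (mid ++ ['3', '2', '1'])) = mid ++ ['3', '2', '1'] := rfl
      rw [e2, List.drop_left]
    · rw [hlen, show mid.length + 8 - 8 = mid.length by omega]
      have e2 : List.drop 5 ('7' :: '8' :: x :: '5' :: '6' :: (mid ++ ['3', '2', '1'])) = mid ++ ['3', '2', '1'] := rfl
      rw [e2, List.take_left]
      exact hodd

theorem matchMask_alt_iff (s : String) : matchMask_alt s = true ↔ PatP s.toList := by
  by_cases h8 : 8 ≤ s.toList.length
  · have h8' : 8 ≤ s.length := by rw [← String.length_toList]; exact h8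
    unfold matchMask_alt
    simp only [Bool.and_eq_true, decide_eq_true_eq, beq_iff_eq, ← String.toList_inj,
      PySem.Str.toList_slice, PySem.Chars.slice_eq_listSlice, PySem.Str.len,
      List.all_eq_true, PySem.Chars.isIn_iff_infix, List.singleton_infix_iff]
    simp [PySem.List.slice]
    rw [show min 2 s.length = 2 by omega, show min 3 s.length = 3 by omega,
        show min 5 s.length = 5 by omega,
        show s.length - (s.length - 3) = 3 by omega,
        show (5 : Nat) - 3 = 2 by norm_num,
        show s.length - 3 - 5 = s.length - 8 by omega]
    have htake3 : List.take 3 (List.drop (s.length - 3) s.toList)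
        = List.drop (s.length - 3) s.toList := by
      apply List.take_of_length_le
      simp only [List.length_drop, String.length_toList]
      omega
    rw [htake3]
    rw [← String.length_toList]
    constructor
    · rintro ⟨⟨⟨⟨-, h1⟩, h2⟩, h3⟩, h4⟩
      exact (conds_iff_patP _ h8).mp ⟨h1, h2, h3, h4⟩
    · intro hP
      obtain ⟨h1, h2, h3, h4⟩ := (conds_iff_patP _ h8).mpr hP
      exact ⟨⟨⟨⟨h8, h1⟩, h2⟩, h3⟩, h4⟩
  · constructor
    · intro h
      unfold matchMask_alt at h
      simp only [Bool.and_eq_true, decide_eq_true_eq, PySem.Str.len] at h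
      exact absurd (by exact_mod_cast h.1.1.1.1) h8
    · intro hP
      exact absurd (patP_length hP) h8

theorem sliceT (L : List Char) (h2 : 2 ≤ L.length) :
    PySem.List.slice L (some 2) (some (-3)) = (L.drop 2).take (L.length - 5) := by
  simp [PySem.List.slice]
  rw [show min 2 L.length = 2 by omega, show L.length - 3 - 2 = L.length - 5 by omega]

theorem matchMask_iff (s : String) : matchMask s = true ↔ PatP s.toList := by
  constructor
  · intro h
    simp [matchMask] at h
    obtain ⟨⟨hsw, hew⟩, hin, hall, hlen⟩ := h
    have hpre78 : ['7', '8'] <+: s.toList := (PySem.Chars.startswith_iff _ _).mp hsw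
    have hsuf : ['3', '2', '1'] <:+ s.toList := (PySem.Chars.endswith_iff _ _).mp hew
    have hn2 : 2 ≤ s.toList.length := le_trans (by norm_num) hpre78.length_le
    rw [sliceT _ hn2] at hin hall hlen
    generalize hTdef : (s.toList.drop 2).take (s.toList.length - 5) = T at hin hall hlen
    have hinf : ['5', '6'] <:+: T := (PySem.Chars.isIn_iff_infix _ _).mp hin
    have hF0 : 0 ≤ PySem.Chars.find T ['5', '6'] := (PySem.Chars.find_nonneg_iff _ _).mpr hinf
    obtain ⟨hpre, hmin⟩ := PySem.Chars.find_spec hF0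
    rw [PySem.List.slice_to _ hF0] at hlen
    simp only [List.length_take] at hlen
    have hlen2 : 2 ≤ T.length - (PySem.Chars.find T ['5', '6']).toNat := by
      have := hpre.length_le
      simpa using this
    have hF1 : (PySem.Chars.find T ['5', '6']).toNat = 1 := by omega
    have hFeq : PySem.Chars.find T ['5', '6'] = 1 := by omega
    obtain ⟨u, hu⟩ := hpre
    rw [hF1] at hu
    obtain ⟨t0, T', hT'⟩ : ∃ a l, T = a :: l := by
      cases T with
      | nil => simp at hlen2
      | cons a l => exact ⟨a, l, rfl⟩
    have hTform : T = t0 :: '5' :: '6' :: u := by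
      rw [hT']
      rw [hT'] at hu
      simp only [List.drop_succ_cons, List.drop_zero] at hu
      rw [← hu]
      rfl
    rw [hFeq, hTform] at hall
    rw [PySem.List.slice_from _ (by norm_num)] at hall
    have hdrop3 : List.drop (Int.toNat (1 + 2)) (t0 :: '5' :: '6' :: u) = u := rfl
    rw [hdrop3] at hall
    simp only [PySem.Chars.isIn_iff_infix, List.singleton_infix_iff] at hall
    have hlenT := congrArg List.length hTdef
    simp only [List.length_take, List.length_drop] at hlenT
    rw [hTform] at hlenT
    simp only [List.length_cons] at hlenT
    have hn8 : s.toList.length = u.length + 8 := by omega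
    have h1 : s.toList.take 2 = ['7', '8'] := by
      have := List.prefix_iff_eq_take.mp hpre78
      simpa using this.symm
    have h2 : s.toList.drop (s.toList.length - 3) = ['3', '2', '1'] := by
      have := List.suffix_iff_eq_drop.mp hsuf
      simpa using this.symm
    have hdec : s.toList = ['7', '8'] ++ (t0 :: '5' :: '6' :: u) ++ ['3', '2', '1'] := by
      calc s.toList = s.toList.take 2 ++ s.toList.drop 2 := (List.take_append_drop 2 _).symm
        _ = s.toList.take 2 ++ ((s.toList.drop 2).take (s.toList.length - 5)
              ++ (s.toList.drop 2).drop (s.toList.length - 5)) := by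
            congr 1
            exact (List.take_append_drop _ _).symm
        _ = s.toList.take 2 ++ ((s.toList.drop 2).take (s.toList.length - 5)
              ++ s.toList.drop (s.toList.length - 3)) := by
            rw [List.drop_drop, show 2 + (s.toList.length - 5) = s.toList.length - 3 by omega]
        _ = ['7', '8'] ++ (t0 :: '5' :: '6' :: u) ++ ['3', '2', '1'] := by
            rw [h1, h2, hTdef, hTform]
            simp
    refine ⟨t0, u, by rw [hdec]; simp, ?_⟩
    intro c hc
    have := hall c hc
    simpa using this
  · rintro ⟨x, mid, hL, hodd⟩
    have hn : s.toList.length = mid.length + 8 := by rw [hL]; simp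
    have hTform : PySem.List.slice s.toList (some 2) (some (-3)) = x :: '5' :: '6' :: mid := by
      rw [sliceT _ (by omega), hL]
      have e1 : List.drop 2 ('7' :: '8' :: x :: '5' :: '6' :: (mid ++ ['3', '2', '1']))
          = (x :: '5' :: '6' :: mid) ++ ['3', '2', '1'] := by simp
      rw [e1, ← hL, hn, show mid.length + 8 - 5 = mid.length + 3 by omega,
        List.take_left' (by simp)]
    have hinf : ['5', '6'] <:+: (x :: '5' :: '6' :: mid) := ⟨[x], mid, by simp⟩
    have hF0 : 0 ≤ PySem.Chars.find (x :: '5' :: '6' :: mid) ['5', '6'] :=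
      (PySem.Chars.find_nonneg_iff _ _).mpr hinf
    obtain ⟨hpre, hmin⟩ := PySem.Chars.find_spec hF0
    have hne0 : (PySem.Chars.find (x :: '5' :: '6' :: mid) ['5', '6']).toNat ≠ 0 := by
      intro h0
      rw [h0] at hpre
      obtain ⟨u, hu⟩ := hpre
      simp only [List.drop_zero] at hu
      simp at hu
    have hle1 : (PySem.Chars.find (x :: '5' :: '6' :: mid) ['5', '6']).toNat ≤ 1 := by
      by_contra hgt
      rw [Nat.not_le] at hgt
      exact hmin 1 (by omega) ⟨mid, rfl⟩
    have hfind : PySem.Chars.find (x :: '5' :: '6' :: mid) ['5', '6'] = 1 := by omega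
    simp [matchMask, hL]
    rw [← hL, hTform, hfind]
    refine ⟨⟨?_, ?_⟩, ?_, ?_, ?_⟩
    · exact (PySem.Chars.startswith_iff _ _).mpr (by rw [hL]; exact ⟨_, rfl⟩)
    · exact (PySem.Chars.endswith_iff _ _).mpr
        (by rw [hL]; exact ⟨'7' :: '8' :: x :: '5' :: '6' :: mid, by simp⟩)
    · exact (PySem.Chars.isIn_iff_infix _ _).mpr hinf
    · rw [PySem.List.slice_from _ (by norm_num)]
      have hdrop3 : List.drop (Int.toNat (1 + 2)) (x :: '5' :: '6' :: mid) = mid := rfl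
      rw [hdrop3]
      intro c hc
      simp only [PySem.Chars.isIn_iff_infix, List.singleton_infix_iff]
      simpa using hodd c hc
    · rw [PySem.List.slice_to _ (by norm_num)]
      rfl

-- ===== VERDICT (by name: the statement is the Claim_ definition above) =====
theorem matchMask_spec : Claim_equal_matchMask := by
  intro s _
  unfold Spec_matchMask
  have := (matchMask_iff s).trans (matchMask_alt_iff s).symm
  cases hA : matchMask s <;> cases hB : matchMask_alt s <;> simp_all
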